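-- pv_equiv track=rewrite | github.com/Kariax/Kards | bot.py | buscar_cartas_usuario
-- ===== SOURCE A (Python) =====
-- import unicodedata
--
-- def quitar_tildes(texto):
--     return ''.join(
--         c for c in unicodedata.normalize('NFD', texto)
--         if unicodedata.category(c) != 'Mn'
--     )
--
-- def buscar_cartas_usuario(nombre, cartas, cartas_usuario):
--     nombre_normalizado = quitar_tildes(nombre.lower())
--     coincidencias = [
--         c for c in cartas
--         if quitar_tildes(c["nombre"].lower()).find(nombre_normalizado) != -1
--         and cartas_usuario.get(c["nombre"], 0) > 0
--     ]
--     exacta = next(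
--         (c for c in cartas if quitar_tildes(c["nombre"].lower()) == nombre_normalizado and cartas_usuario.get(c["nombre"], 0) > 0),
--         None
--     )
--     if exacta:
--         return [exacta]
--     return coincidencias
-- ===== SOURCE B (Python) =====
-- import unicodedata
--
-- def quitar_tildes(texto):
--     return ''.join(
--         c for c in unicodedata.normalize('NFD', texto)
--         if unicodedata.category(c) != 'Mn'
--     )
--
-- def buscar_cartas_usuario(nombre, cartas, cartas_usuario):
--     objetivo = quitar_tildes(nombre.lower())
--     # Group-by index: one pass builds normalized-name -> list of positions of owned cards.
--     grupos = {}
--     for i, c in enumerate(cartas):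
--         if cartas_usuario.get(c["nombre"], 0) > 0:
--             grupos.setdefault(quitar_tildes(c["nombre"].lower()), []).append(i)
--     # Exact match is an O(1) hash lookup; its first position is the first owned exact card.
--     if objetivo in grupos:
--         return [cartas[grupos[objetivo][0]]]
--     # Substring query scans the DISTINCT normalized names only; merging the per-name
--     # position lists with a sort restores the original card order.
--     indices = sorted(i for clave, idxs in grupos.items()
--                      if objetivo in clave for i in idxs)
--     return [cartas[i] for i in indices]
-- ===== Notes on version B (the rewrite author's own statement) =====
-- stated objective: alternative
-- what changed: Replaces A's two linear scans (filter comprehension + next() scan) by a group-by hash index from normalized name to the positions of owned cards: the exact-match query becomes a single dict lookup (first position of the group), and the substring query scans only the distinct normalized names, merging their position lists with a sort to restore the original card order.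
import Mathlib
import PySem

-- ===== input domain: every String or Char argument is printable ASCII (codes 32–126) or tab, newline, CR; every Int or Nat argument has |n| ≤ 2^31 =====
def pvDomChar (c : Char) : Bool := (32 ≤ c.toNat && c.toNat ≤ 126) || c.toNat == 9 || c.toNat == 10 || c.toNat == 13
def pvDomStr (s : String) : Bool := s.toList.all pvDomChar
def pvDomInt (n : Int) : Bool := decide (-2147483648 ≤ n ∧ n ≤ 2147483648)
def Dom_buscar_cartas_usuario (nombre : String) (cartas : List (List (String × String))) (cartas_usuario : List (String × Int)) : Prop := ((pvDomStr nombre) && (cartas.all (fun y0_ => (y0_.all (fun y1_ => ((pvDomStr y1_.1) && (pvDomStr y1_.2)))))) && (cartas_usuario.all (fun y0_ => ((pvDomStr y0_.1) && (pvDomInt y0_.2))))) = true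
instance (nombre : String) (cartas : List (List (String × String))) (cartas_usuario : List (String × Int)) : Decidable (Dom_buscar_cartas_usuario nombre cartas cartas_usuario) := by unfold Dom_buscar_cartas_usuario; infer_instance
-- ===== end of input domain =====

-- B replaces A's two scans (filter comprehension + next()) by a group-by hash index
-- from normalized name to positions of owned cards: exact match is a dict lookup,
-- the substring query scans distinct names and a sort restores original card order
-- (objective: alternative algorithm/data structure, similar cost).


-- ===== PORT A =====
-- quitar_tildes strips combining marks after NFD normalization; on the printable-ASCII
-- domain (Dom_) NFD is the identity and no character has category Mn, so it is exact
-- as the identity there.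
def quitar_tildes (texto : String) : String := texto

-- c["nombre"]: first-match lookup in the card's association list (default "" only
-- reachable outside Pre_, where Python A raises KeyError).
def pvCardName (c : List (String × String)) : String := (PySem.Dict.mk c).getD "nombre" ""

def buscar_cartas_usuario (nombre : String) (cartas : List (List (String × String))) (cartas_usuario : List (String × Int)) : List (List (String × String)) :=
  let nombre_normalizado := quitar_tildes (PySem.Str.lower nombre)
  let coincidencias := cartas.filter (fun c =>
    (PySem.Str.find (quitar_tildes (PySem.Str.lower (pvCardName c))) nombre_normalizado != -1)
    && decide ((PySem.Dict.mk cartas_usuario).getD (pvCardName c) 0 > 0))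
  match cartas.find? (fun c =>
    (quitar_tildes (PySem.Str.lower (pvCardName c)) == nombre_normalizado)
    && decide ((PySem.Dict.mk cartas_usuario).getD (pvCardName c) 0 > 0)) with
  | some exacta => if exacta.isEmpty then coincidencias else [exacta]  -- `if exacta:` truthiness of the dict
  | none => coincidencias

-- ===== PORT B =====
def buscar_cartas_usuario_alt (nombre : String) (cartas : List (List (String × String))) (cartas_usuario : List (String × Int)) : List (List (String × String)) :=
  let objetivo := quitar_tildes (PySem.Str.lower nombre)
  -- grupos.setdefault(clave, []).append(i)  ==  grupos[clave] = grupos.get(clave, []) + [i]  ==  Dict.modify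
  let grupos := (PySem.List.enumerate cartas).foldl
    (fun (g : PySem.Dict String (List Int)) p =>
      if decide ((PySem.Dict.mk cartas_usuario).getD (pvCardName p.2) 0 > 0) then
        g.modify (quitar_tildes (PySem.Str.lower (pvCardName p.2))) [] (fun l => l ++ [p.1])
      else g)
    PySem.Dict.empty
  match grupos.get? objetivo with
  -- idxs[0] and cartas[i]: the indices come from enumerate, so always in range; the
  -- pyGetD defaults are unreachable (groups are nonempty by construction)
  | some idxs => [PySem.List.pyGetD cartas (PySem.List.pyGetD idxs 0 (-1)) []]
  | none =>
      let indices := PySem.List.sorted (grupos.items.flatMap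
        (fun kv => if PySem.Str.isIn objetivo kv.1 then kv.2 else [])) (fun i => i) false
      indices.map (fun i => PySem.List.pyGetD cartas i [])

-- ===== PRECONDITION & SPEC =====
-- Pre_ excludes exactly the inputs where some card lacks the key "nombre": there
-- Python A raises KeyError (the comprehension evaluates c["nombre"] for every card).
def Pre_buscar_cartas_usuario (nombre : String) (cartas : List (List (String × String))) (cartas_usuario : List (String × Int)) : Prop :=
  ∀ c ∈ cartas, (PySem.Dict.mk c).contains "nombre" = true
instance (nombre : String) (cartas : List (List (String × String))) (cartas_usuario : List (String × Int)) : Decidable (Pre_buscar_cartas_usuario nombre cartas cartas_usuario) := by unfold Pre_buscar_cartas_usuario; infer_instance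

def pvWitness_buscar_cartas_usuario : String × (List (List (String × String))) × (List (String × Int)) :=
  ("luz", [[("nombre", "Luz")], [("nombre", "luzbel")]], [("Luz", 2), ("luzbel", 1)])

def Spec_buscar_cartas_usuario (nombre : String) (cartas : List (List (String × String))) (cartas_usuario : List (String × Int)) (out : List (List (String × String))) : Prop := out = buscar_cartas_usuario_alt nombre cartas cartas_usuario
instance (nombre : String) (cartas : List (List (String × String))) (cartas_usuario : List (String × Int)) (out : List (List (String × String))) : Decidable (Spec_buscar_cartas_usuario nombre cartas cartas_usuario out) := by unfold Spec_buscar_cartas_usuario; infer_instance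

-- ===== CLAIM (what is proved, stated in full; the proofs are below) =====
def Claim_equal_buscar_cartas_usuario : Prop := ∀ (nombre : String) (cartas : List (List (String × String))) (cartas_usuario : List (String × Int)), Dom_buscar_cartas_usuario nombre cartas cartas_usuario → Pre_buscar_cartas_usuario nombre cartas cartas_usuario → Spec_buscar_cartas_usuario nombre cartas cartas_usuario (buscar_cartas_usuario nombre cartas cartas_usuario)

-- ===== LEMMAS AND PROOFS =====

-- `sub in s` agrees with `s.find(sub) != -1`.
theorem isIn_eq_find_ne (sub s : String) :
    PySem.Str.isIn sub s = (PySem.Str.find s sub != -1) := by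
  simp only [PySem.Str.isIn_eq, PySem.Str.find_eq]
  by_cases h : sub.toList <:+: s.toList
  · have h1 : PySem.Chars.isIn sub.toList s.toList = true := (PySem.Chars.isIn_iff_infix _ _).mpr h
    have h2 : PySem.Chars.find s.toList sub.toList ≠ -1 := (PySem.Chars.find_ne_neg_one_iff _ _).mpr h
    simp [h1, h2]
  · have h1 : PySem.Chars.isIn sub.toList s.toList = false := (PySem.Chars.isIn_eq_false_iff _ _).mpr h
    have h2 : PySem.Chars.find s.toList sub.toList = -1 := (PySem.Chars.find_eq_neg_one_iff _ _).mpr h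
    simp [h1, h2]

-- enumerate then filter on the element, projected to the element, is filter.
theorem mapSnd_filter_enumerate {α : Type} (xs : List α) (s : Int) (q : α → Bool) :
    (((PySem.List.enumerate xs s).filter (fun p => q p.2)).map (·.2)) = xs.filter q := by
  induction xs generalizing s with
  | nil => simp [PySem.List.enumerate_nil]
  | cons x t ih =>
    rw [PySem.List.enumerate_cons, List.filter_cons, List.filter_cons]
    by_cases h : q x <;> simp [h, ih]

-- every (index, element) pair of enumerate indexes back to its element.
theorem pyGetD_enumerate {α : Type} (xs : List α) (d : α) (p : Int × α)
    (hp : p ∈ PySem.List.enumerate xs 0) : PySem.List.pyGetD xs p.1 d = p.2 := by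
  rcases (PySem.List.mem_enumerate_iff _ _ _).mp hp with ⟨k, hk, rfl⟩
  simp [PySem.List.pyGetD_natCast, List.getD_eq_getElem?_getD, hk]

-- partitioning a list by its key values over a duplicate-free covering key list is a permutation.
theorem flatMap_filter_key_perm {α : Type} (ks : List String) (key : α → String)
    (l : List α) (hnd : ks.Nodup) (hcov : ∀ x ∈ l, key x ∈ ks) :
    (ks.flatMap (fun k => l.filter (fun x => key x == k))).Perm l := by
  induction ks generalizing l with
  | nil =>
    have : l = [] := by
      cases l with
      | nil => rfl
      | cons a t => exact absurd (hcov a (by simp)) (by simp)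
    simp [this]
  | cons k ks ih =>
    rw [List.flatMap_cons]
    obtain ⟨hkn, hks⟩ := List.nodup_cons.mp hnd
    have hfm : ∀ k' ∈ ks, l.filter (fun x => key x == k')
        = (l.filter (fun x => !(key x == k))).filter (fun x => key x == k') := by
      intro k' hk'
      rw [List.filter_filter]
      apply List.filter_congr
      intro x _
      by_cases h : key x = k'
      · have hne : ¬ k' = k := fun hc => hkn (hc ▸ hk')
        simp [h, hne]
      · simp [h]
    rw [List.flatMap_congr (h := fun k' hk' => hfm k' hk')]
    have hperm := ih (l.filter (fun x => !(key x == k))) hks (by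
      intro x hx
      obtain ⟨hxl, hxk⟩ := List.mem_filter.mp hx
      rcases List.mem_cons.mp (hcov x hxl) with hh | hh
      · simp [hh] at hxk
      · exact hh)
    exact (hperm.append_left _).trans (List.filter_append_perm _ l)

-- the grouping fold, rewritten as the standard keyed-modify loop over the owned pairs.
theorem groups_fold_eq {C : Type} (L : List (Int × C)) (own : C → Bool) (key : C → String) :
    L.foldl (fun (g : PySem.Dict String (List Int)) p =>
        if own p.2 then g.modify (key p.2) [] (fun l => l ++ [p.1]) else g) PySem.Dict.empty
    = ((L.filter (fun p => own p.2)).map (fun p => (key p.2, p.1))).foldl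
        (fun d q => d.modify q.1 [] (fun l => l ++ [q.2])) PySem.Dict.empty := by
  rw [PySem.List.foldl_if_eq_foldl_filter, List.foldl_map]

theorem buscar_cartas_usuario_spec : Claim_equal_buscar_cartas_usuario := by
  intro nombre cartas cartas_usuario _hdom hpre
  unfold Spec_buscar_cartas_usuario buscar_cartas_usuario buscar_cartas_usuario_alt
  simp only
  set obj := quitar_tildes (PySem.Str.lower nombre) with hobj
  set own : List (String × String) → Bool :=
    fun c => decide ((PySem.Dict.mk cartas_usuario).getD (pvCardName c) 0 > 0) with hown
  set nrm : List (String × String) → String :=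
    fun c => quitar_tildes (PySem.Str.lower (pvCardName c)) with hnrm
  set L := PySem.List.enumerate cartas with hL
  rw [groups_fold_eq L own nrm]
  set L' := L.filter (fun p => own p.2) with hL'
  set g := ((L'.map (fun p => (nrm p.2, p.1))).foldl
      (fun d q => d.modify q.1 [] (fun l => l ++ [q.2])) PySem.Dict.empty) with hg
  -- characterization of the groups dict
  have hgetD : ∀ k, g.getD k [] = ((L'.filter (fun p => nrm p.2 == k)).map (·.1)) := by
    intro k
    rw [hg, PySem.Dict.getD_foldl_modify_append, PySem.Dict.getD_empty]
    rw [List.filter_map, List.map_map]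
    rfl
  have hkeys : g.keys = PySem.Set.ofList (L'.map (fun p => nrm p.2)) := by
    rw [hg, PySem.Dict.keys_foldl_modify_key (key := Prod.fst), PySem.Dict.keys_empty]
    rw [PySem.Set.update_nil_left, List.map_map]
    rfl
  have hnodup : g.keys.Nodup := by
    rw [hkeys]; exact PySem.Set.nodup_ofList _
  have hcontains : ∀ k, g.contains k = true ↔ ∃ p ∈ L', nrm p.2 = k := by
    intro k
    rw [PySem.Dict.contains_iff_mem_keys, hkeys, PySem.Set.mem_ofList]
    simp
  -- A's exact scan is the head of the exact group's pairs
  have hfind : cartas.find? (fun c => (nrm c == obj) && own c)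
      = ((L'.filter (fun p => nrm p.2 == obj)).map (·.2)).head? := by
    rw [← List.head?_filter]
    congr 1
    rw [hL', List.filter_filter]
    rw [← mapSnd_filter_enumerate cartas 0 (fun c => (nrm c == obj) && own c)]
  cases hq : g.get? obj with
  | some idxs =>
    -- exact hit: both sides return the first owned exact card
    have hidxs : idxs = (L'.filter (fun p => nrm p.2 == obj)).map (·.1) := by
      have h1 : g.getD obj [] = idxs := by
        rw [PySem.Dict.getD_eq_get?_getD, hq]; rfl
      rw [← h1, hgetD]
    cases hF : L'.filter (fun p => nrm p.2 == obj) with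
    | nil =>
      exfalso
      have hc : g.contains obj = true := by
        rw [PySem.Dict.contains_eq_isSome_get?, hq]; rfl
      rcases (hcontains obj).mp hc with ⟨p, hp, hpk⟩
      have hmem : p ∈ L'.filter (fun p => nrm p.2 == obj) := by
        rw [List.mem_filter]; exact ⟨hp, by simp [hpk]⟩
      rw [hF] at hmem; exact absurd hmem (List.not_mem_nil)
    | cons f0 F =>
      have hfind2 : cartas.find? (fun c => (nrm c == obj) && own c) = some f0.2 := by
        rw [hfind, hF]; rfl
      have hf0L : f0 ∈ L := by
        have hmem : f0 ∈ L'.filter (fun p => nrm p.2 == obj) := by rw [hF]; simp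
        exact List.mem_of_mem_filter (List.mem_of_mem_filter hmem)
      have hmemc : f0.2 ∈ cartas := by
        rcases (PySem.List.mem_enumerate_iff _ _ _).mp hf0L with ⟨k, hk, rfl⟩
        simp
      have hne : f0.2 ≠ [] := by
        intro hnil
        have hc := hpre f0.2 hmemc
        rw [hnil] at hc
        simp [PySem.Dict.contains] at hc
      have hidx0 : PySem.List.pyGetD idxs 0 (-1) = f0.1 := by
        rw [hidxs, hF, PySem.List.pyGetD_zero]
        rfl
      have hback : PySem.List.pyGetD cartas f0.1 [] = f0.2 :=
        pyGetD_enumerate cartas [] f0 hf0L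
      rw [hfind2]
      simp [hidx0, hback, List.isEmpty_iff, hne]
  | none =>
    -- no exact hit: A's find? misses; the merged matching groups are A's filter
    have hF : L'.filter (fun p => nrm p.2 == obj) = [] := by
      rw [List.filter_eq_nil_iff]
      intro p hp hpk
      have hc : g.contains obj = true := (hcontains obj).mpr ⟨p, hp, by simpa using hpk⟩
      rw [PySem.Dict.contains_eq_isSome_get?, hq] at hc
      simp at hc
    have hfind2 : cartas.find? (fun c => (nrm c == obj) && own c) = none := by
      rw [hfind, hF]; rfl
    set M := L'.filter (fun p => PySem.Str.isIn obj (nrm p.2)) with hM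
    have hitems : g.items.flatMap (fun kv => if PySem.Str.isIn obj kv.1 then kv.2 else [])
        = (g.keys.flatMap (fun k => M.filter (fun p => nrm p.2 == k))).map (·.1) := by
      rw [PySem.Dict.items_eq_map_keys g hnodup []]
      rw [List.flatMap_map, List.map_flatMap]
      apply List.flatMap_congr
      intro k hk
      dsimp only
      by_cases hin : PySem.Str.isIn obj k = true
      · rw [if_pos hin, hgetD]
        have heq : L'.filter (fun p => nrm p.2 == k) = M.filter (fun p => nrm p.2 == k) := by
          simp only [hM, hL', List.filter_filter]
          apply List.filter_congr
          intro p _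
          have hinC : PySem.Chars.isIn obj.toList k.toList = true := by
            simpa using hin
          by_cases hpk : nrm p.2 = k <;> by_cases ho : own p.2 <;> simp [hpk, hinC, ho]
        rw [heq]
      · rw [if_neg hin]
        have hnil : M.filter (fun p => nrm p.2 == k) = [] := by
          rw [List.filter_eq_nil_iff]
          intro p hp hpk
          have hpin := (List.mem_filter.mp hp).2
          rw [eq_of_beq hpk] at hpin
          exact hin hpin
        rw [hnil]
        rfl
    have hperm : ((g.keys.flatMap (fun k => M.filter (fun p => nrm p.2 == k))).map (·.1)).Perm
        (M.map (·.1)) := by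
      apply List.Perm.map
      apply flatMap_filter_key_perm g.keys (fun p => nrm p.2) M hnodup
      intro p hp
      rw [hkeys, PySem.Set.mem_ofList]
      exact List.mem_map_of_mem (List.mem_of_mem_filter hp)
    have hpair : (M.map (·.1)).Pairwise (fun a b => a < b) := by
      have h0 : L.Pairwise (fun p q => p.1 < q.1) := PySem.List.pairwise_lt_enumerate _ _
      have h1 : L'.Pairwise (fun p q => p.1 < q.1) := h0.sublist List.filter_sublist
      have h2 : M.Pairwise (fun p q => p.1 < q.1) := h1.sublist List.filter_sublist
      exact List.pairwise_map.mpr h2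
    have hsorted : PySem.List.sorted
        (g.items.flatMap (fun kv => if PySem.Str.isIn obj kv.1 then kv.2 else []))
        (fun i => i) false = M.map (·.1) := by
      rw [hitems]
      exact PySem.List.sorted_eq_of_perm_of_pairwise_lt _ _ _ hperm.symm hpair
    have hback : (M.map (·.1)).map (fun i => PySem.List.pyGetD cartas i []) = M.map (·.2) := by
      rw [List.map_map]
      apply List.map_congr_left
      intro p hp
      exact pyGetD_enumerate cartas [] p
        (List.mem_of_mem_filter (List.mem_of_mem_filter hp))
    have hMsnd : M.map (·.2)
        = cartas.filter (fun c => PySem.Str.isIn obj (nrm c) && own c) := by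
      rw [hM, hL', List.filter_filter]
      exact mapSnd_filter_enumerate cartas 0 (fun c => PySem.Str.isIn obj (nrm c) && own c)
    have hA : cartas.filter (fun c =>
          (PySem.Str.find (nrm c) obj != -1) && own c)
        = cartas.filter (fun c => PySem.Str.isIn obj (nrm c) && own c) := by
      apply List.filter_congr
      intro c _
      rw [isIn_eq_find_ne]
    rw [hfind2]
    simp only [hsorted, hback, hMsnd]
    exact hA
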